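-- pv_equiv track=rewrite | github.com/jameslawlor/advent-of-code-python | src/advent_of_code/year_2025/day_03.py | calculate_largest_joltage
-- ===== SOURCE A (Python) =====
-- def combine_joltages(list_of_joltages):
--     return int("".join([str(x) for x in list_of_joltages]))
--
-- def calculate_largest_joltage(battery_bank_as_ints):
--     largest_joltage_1 = 0
--
--     for battery_index, battery_value in enumerate(battery_bank_as_ints):
--      if (battery_value > largest_joltage_1) and (battery_index < len(battery_bank_as_ints) - 1):
--          largest_joltage_1 = battery_value
--          largest_joltage_2 = 0
--          for second_battery_value in battery_bank_as_ints[battery_index+1:]: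
--              if second_battery_value > largest_joltage_2:
--                  largest_joltage_2 = second_battery_value
--
--     return combine_joltages([largest_joltage_1, largest_joltage_2])
-- ===== SOURCE B (Python) =====
-- def calculate_largest_joltage(battery_bank_as_ints):
--     head = battery_bank_as_ints[:-1]
--     largest_joltage_1 = max(head)
--     first_index = head.index(largest_joltage_1)
--     largest_joltage_2 = max([0] + battery_bank_as_ints[first_index + 1:])
--     return int(str(largest_joltage_1) + str(largest_joltage_2))
-- ===== Notes on version B (the rewrite author's own statement) =====
-- stated objective: faster
-- what changed: A rescans the whole suffix with an inner loop at every new running maximum (quadratic on increasing lists); B does a single library max over the head, takes the first index of that maximum, and one max over the suffix after it, then concatenates the two digit strings.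
import Mathlib
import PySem

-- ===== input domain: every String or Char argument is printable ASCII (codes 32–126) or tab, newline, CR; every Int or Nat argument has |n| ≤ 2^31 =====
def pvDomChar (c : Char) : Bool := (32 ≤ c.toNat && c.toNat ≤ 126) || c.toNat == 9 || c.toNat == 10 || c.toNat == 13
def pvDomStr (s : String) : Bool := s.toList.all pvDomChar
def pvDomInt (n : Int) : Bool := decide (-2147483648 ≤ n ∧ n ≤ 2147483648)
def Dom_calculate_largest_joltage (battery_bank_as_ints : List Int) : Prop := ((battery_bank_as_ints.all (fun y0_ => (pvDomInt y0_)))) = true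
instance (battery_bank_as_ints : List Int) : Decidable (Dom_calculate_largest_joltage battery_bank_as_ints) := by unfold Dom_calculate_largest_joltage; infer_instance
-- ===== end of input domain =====

-- B replaces A's quadratic rescan-the-suffix-at-every-new-maximum loop by one max over the head,
-- the first index of that maximum, and one max over the suffix after it (O(n)); objective: faster.


-- ===== PORT A =====
-- int("".join([str(x) for x in list_of_joltages])); none = ValueError
def combine_joltages (list_of_joltages : List Int) : Option Int :=
  PySem.Int.ofStr? (PySem.Str.join "" (list_of_joltages.map PySem.Int.toStr))

-- literal port of A: fold over enumerate; state = (largest_joltage_1, largest_joltage_2?)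
-- where 'none' is the never-assigned largest_joltage_2 (NameError at the end; excluded by Pre_).
def calculate_largest_joltage (battery_bank_as_ints : List Int) : Int :=
  let st := (PySem.List.enumerate battery_bank_as_ints).foldl
    (fun (s : Int × Option Int) (p : Int × Int) =>
      if s.1 < p.2 ∧ p.1 < (battery_bank_as_ints.length : Int) - 1 then
        (p.2, some ((PySem.List.slice battery_bank_as_ints (some (p.1 + 1)) none).foldl
          (fun a w => if a < w then w else a) 0))
      else s)
    ((0 : Int), (none : Option Int))
  match st.2 with
  | some l2 => (combine_joltages [st.1, l2]).getD 0   -- ValueError impossible under Pre_ (l1>0, l2≥0)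
  | none => 0                                          -- NameError; excluded by Pre_

-- ===== PORT B =====
-- literal port of Source B: head = bs[:-1]; l1 = max(head); i0 = head.index(l1);
-- l2 = max([0] + bs[i0+1:]); int(str(l1) + str(l2))
def calculate_largest_joltage_alt (battery_bank_as_ints : List Int) : Int :=
  let head := PySem.List.slice battery_bank_as_ints none (some (-1))
  match PySem.List.max? head (fun y => y) with
  | none => 0            -- max([]) raises ValueError; excluded by Pre_
  | some largest_joltage_1 =>
    let first_index : Nat := (PySem.List.index? head largest_joltage_1).getD 0  -- always some: l1 ∈ head
    let largest_joltage_2 :=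
      (PySem.List.max? ((0 : Int) :: PySem.List.slice battery_bank_as_ints (some ((first_index : Int) + 1)) none)
        (fun y => y)).getD 0   -- nonempty list: getD never used
    (PySem.Int.ofStr? (PySem.Int.toStr largest_joltage_1 ++ PySem.Int.toStr largest_joltage_2)).getD 0

-- ===== PRECONDITION & SPEC =====
-- Pre_ excludes exactly the inputs where A raises: unless some element before the last is
-- positive, largest_joltage_2 is never assigned and the final read raises NameError.
def Pre_calculate_largest_joltage (battery_bank_as_ints : List Int) : Prop :=
  ∃ v ∈ battery_bank_as_ints.dropLast, 0 < v
instance (battery_bank_as_ints : List Int) : Decidable (Pre_calculate_largest_joltage battery_bank_as_ints) := by unfold Pre_calculate_largest_joltage; infer_instance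
def pvWitness_calculate_largest_joltage : List Int := [3, 1, 4, 1]

def Spec_calculate_largest_joltage (battery_bank_as_ints : List Int) (out : Int) : Prop := out = calculate_largest_joltage_alt battery_bank_as_ints
instance (battery_bank_as_ints : List Int) (out : Int) : Decidable (Spec_calculate_largest_joltage battery_bank_as_ints out) := by unfold Spec_calculate_largest_joltage; infer_instance

-- ===== CLAIM (what is proved, stated in full; the proofs are below) =====
def Claim_equal_calculate_largest_joltage : Prop := ∀ (battery_bank_as_ints : List Int), Dom_calculate_largest_joltage battery_bank_as_ints → Pre_calculate_largest_joltage battery_bank_as_ints → Spec_calculate_largest_joltage battery_bank_as_ints (calculate_largest_joltage battery_bank_as_ints)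

-- ===== LEMMAS AND PROOFS =====

-- A's running-max accumulator (the inner loop body, verbatim)
def pvMaxf (z : Int) (l : List Int) : Int :=
  l.foldl (fun a w => if a < w then w else a) z

-- A's outer loop, index-free: at each element the remaining list IS the suffix bs[i+1:].
def pvLoopA : Int × Option Int → List Int → Int × Option Int
  | s, [] => s
  | s, v :: rest =>
      if s.1 < v ∧ rest ≠ [] then pvLoopA (v, some (pvMaxf 0 rest)) rest
      else pvLoopA s rest

theorem pvMaxf_eq_foldl_max (z : Int) (l : List Int) : pvMaxf z l = l.foldl max z := by
  induction l generalizing z with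
  | nil => rfl
  | cons x t ih =>
    simp only [pvMaxf, List.foldl_cons] at *
    rw [ih]
    congr 1
    rcases lt_trichotomy z x with h | h | h <;> simp [max_def] <;> omega

theorem pvMaxf_of_all_le (z : Int) (l : List Int) (h : ∀ x ∈ l, x ≤ z) : pvMaxf z l = z := by
  induction l generalizing z with
  | nil => rfl
  | cons x t ih =>
    simp only [pvMaxf, List.foldl_cons] at *
    rw [if_neg (by have := h x (List.mem_cons_self ..); omega)]
    exact ih z (fun y hy => h y (List.mem_cons_of_mem _ hy))

theorem pvLe_maxf (z : Int) (l : List Int) : z ≤ pvMaxf z l := by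
  rw [pvMaxf_eq_foldl_max]
  induction l generalizing z with
  | nil => simp
  | cons x t ih =>
    simp only [List.foldl_cons]
    exact le_trans (le_max_left z x) (ih (max z x))

theorem pvMem_le_maxf (z : Int) (l : List Int) (x : Int) (hx : x ∈ l) : x ≤ pvMaxf z l := by
  rw [pvMaxf_eq_foldl_max]
  induction l generalizing z with
  | nil => simp at hx
  | cons y t ih =>
    simp only [List.foldl_cons]
    rcases List.mem_cons.mp hx with h | h
    · subst h
      have h1 : max z x ≤ pvMaxf (max z x) t := pvLe_maxf (max z x) t
      rw [pvMaxf_eq_foldl_max] at h1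
      exact le_trans (le_max_right z x) h1
    · exact ih (max z y) h

-- bridge: A's fold over enumerate equals pvLoopA on the corresponding suffix
theorem pvFoldA_eq_loopA (bs : List Int) :
    ∀ (l : List Int) (i : Nat) (s : Int × Option Int), bs.drop i = l →
      (PySem.List.enumerate l (i : Int)).foldl
        (fun (s : Int × Option Int) (p : Int × Int) =>
          if s.1 < p.2 ∧ p.1 < (bs.length : Int) - 1 then
            (p.2, some ((PySem.List.slice bs (some (p.1 + 1)) none).foldl
              (fun a w => if a < w then w else a) 0))
          else s) s
      = pvLoopA s l := by
  intro l
  induction l with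
  | nil => intro i s h; simp [PySem.List.enumerate, pvLoopA]
  | cons v rest ih =>
    intro i s h
    rw [PySem.List.enumerate_cons, List.foldl_cons]
    have hrest : bs.drop (i + 1) = rest := by
      have := congrArg List.tail h
      simpa [List.tail_drop] using this
    have hlen : (i : Int) < (bs.length : Int) - 1 ↔ rest ≠ [] := by
      have h1 : i < bs.length := by
        by_contra hc
        simp [List.drop_eq_nil_of_le (le_of_not_gt hc)] at h
      constructor
      · intro hi hre
        have : bs.length ≤ i + 1 := by
          by_contra hc
          have := List.drop_eq_nil_iff.mp (hre ▸ hrest ▸ rfl : bs.drop (i+1) = [])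
          omega
        omega
      · intro hre
        have : bs.drop (i+1) ≠ [] := hrest ▸ hre
        have := List.drop_eq_nil_iff.not.mp this
        omega
    have hslice : PySem.List.slice bs (some ((i : Int) + 1)) none = rest := by
      have : ((i : Int) + 1) = (((i + 1 : Nat) : Int)) := by push_cast; ring
      rw [this, PySem.List.slice_from_natCast, hrest]
    by_cases hc : s.1 < v ∧ rest ≠ []
    · rw [if_pos ⟨hc.1, hlen.mpr hc.2⟩]
      rw [hslice]
      rw [show ((i : Int) + 1) = (((i + 1 : Nat)) : Int) by push_cast; ring]
      rw [ih (i + 1) _ hrest]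
      rw [pvLoopA]
      rw [if_pos hc]
      push_cast
      rfl
    · have : ¬ (s.1 < v ∧ (i : Int) < (bs.length : Int) - 1) := by
        intro ⟨h1, h2⟩; exact hc ⟨h1, hlen.mp h2⟩
      rw [if_neg this]
      rw [show ((i : Int) + 1) = (((i + 1 : Nat)) : Int) by push_cast; ring]
      rw [ih (i + 1) s hrest, pvLoopA, if_neg hc]

theorem pvLoopA_of_all_le : ∀ (l : List Int) (s : Int × Option Int),
    (∀ x ∈ l.dropLast, x ≤ s.1) → pvLoopA s l = s := by
  intro l
  induction l with
  | nil => intro s h; rfl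
  | cons v rest ih =>
    intro s h
    rcases eq_or_ne rest [] with hre | hre
    · subst hre
      rw [pvLoopA, if_neg (by simp)]
      exact ih s (by simp)
    · have hdl : (v :: rest).dropLast = v :: rest.dropLast := by
        cases rest with | nil => exact absurd rfl hre | cons a t => rfl
      rw [hdl] at h
      rw [pvLoopA, if_neg (by
        intro hc
        exact absurd (h v (List.mem_cons_self ..)) (by omega))]
      exact ih s (fun x hx => h x (List.mem_cons_of_mem _ hx))

-- characterization of pvLoopA when an update happens
theorem pvLoopA_char : ∀ (l : List Int) (l1 : Int) (s2 : Option Int),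
    (∃ v ∈ l.dropLast, l1 < v) →
    pvLoopA (l1, s2) l =
      (pvMaxf l1 l.dropLast,
       some (pvMaxf 0 (l.drop (l.dropLast.idxOf (pvMaxf l1 l.dropLast) + 1)))) := by
  intro l
  induction l with
  | nil => intro l1 s2 h; simp at h
  | cons v rest ih =>
    intro l1 s2 h
    rcases eq_or_ne rest [] with hre | hre
    · subst hre; simp at h
    have hdl : (v :: rest).dropLast = v :: rest.dropLast := by
      cases rest with | nil => exact absurd rfl hre | cons a t => rfl
    rw [hdl] at h ⊢
    by_cases hv : l1 < v
    · rw [pvLoopA, if_pos ⟨hv, hre⟩]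
      by_cases hup : ∃ w ∈ rest.dropLast, v < w
      · rw [ih v _ hup]
        obtain ⟨w, hw, hvw⟩ := hup
        have hM : pvMaxf l1 (v :: rest.dropLast) = pvMaxf v rest.dropLast := by
          simp only [pvMaxf, List.foldl_cons, if_pos hv]
        have hMneV1 : pvMaxf v rest.dropLast ≠ v := by
          have := pvMem_le_maxf v rest.dropLast w hw
          omega
        rw [hM, List.idxOf_cons_ne _ (by intro hc; exact hMneV1 hc.symm)]
        simp [List.drop_succ_cons]
      · push Not at hup
        rw [pvLoopA_of_all_le rest (v, some (pvMaxf 0 rest)) (by intro x hx; exact hup x hx)]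
        have hM : pvMaxf l1 (v :: rest.dropLast) = v := by
          simp only [pvMaxf, List.foldl_cons, if_pos hv]
          exact pvMaxf_of_all_le v rest.dropLast hup
        rw [hM, List.idxOf_cons_self]
        simp
    · rw [pvLoopA, if_neg (fun hc => hv hc.1)]
      have h' : ∃ w ∈ rest.dropLast, l1 < w := by
        obtain ⟨w, hw, hlw⟩ := h
        rcases List.mem_cons.mp hw with hww | hww
        · exact absurd (hww ▸ hlw) hv
        · exact ⟨w, hww, hlw⟩
      rw [ih l1 s2 h']
      obtain ⟨w, hw, hlw⟩ := h'
      have hM : pvMaxf l1 (v :: rest.dropLast) = pvMaxf l1 rest.dropLast := by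
        simp only [pvMaxf, List.foldl_cons, if_neg hv]
      have hMneV : pvMaxf l1 rest.dropLast ≠ v := by
        have h1 := pvMem_le_maxf l1 rest.dropLast w hw
        omega
      rw [hM, List.idxOf_cons_ne _ (fun hc => hMneV hc.symm)]
      simp [List.drop_succ_cons]

theorem pvFoldlMax_init (t : List Int) (a b : Int) :
    t.foldl max (max a b) = max a (t.foldl max b) := by
  induction t generalizing b with
  | nil => rfl
  | cons x xs ih => simp only [List.foldl_cons, max_assoc, ih]

theorem pvMaxf_eq_or_mem (z : Int) (l : List Int) : pvMaxf z l = z ∨ pvMaxf z l ∈ l := by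
  induction l generalizing z with
  | nil => left; rfl
  | cons x t ih =>
    simp only [pvMaxf, List.foldl_cons] at *
    rcases ih (if z < x then x else z) with h | h
    · by_cases hz : z < x
      · right; rw [h, if_pos hz]; exact List.mem_cons_self ..
      · left; rw [h, if_neg hz]
    · right; exact List.mem_cons_of_mem _ h

theorem pvJoin_two (a b : String) : PySem.Str.join "" [a, b] = a ++ b := by
  apply String.toList_injective
  rw [String.toList_append, PySem.Str.toList_join]
  simp [PySem.Chars.join_cons_cons, PySem.Chars.join_singleton]

theorem pvIndex?_getD (l : List Int) (x : Int) (h : x ∈ l) :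
    (PySem.List.index? l x).getD 0 = l.idxOf x := by
  rw [PySem.List.index?_eq_idxOf?]
  rcases ho : List.idxOf? x l with _ | k
  · rw [List.idxOf?_eq_none_iff] at ho; exact absurd h ho
  · have h2 := List.idxOf_eq_getD_idxOf? x l
    rw [ho] at h2
    simp [h2]

theorem calculate_largest_joltage_spec' (bs : List Int)
    (h : Pre_calculate_largest_joltage bs) :
    calculate_largest_joltage bs = calculate_largest_joltage_alt bs := by
  obtain ⟨v, hv, hvpos⟩ := h
  have hne : bs.dropLast ≠ [] := List.ne_nil_of_mem hv
  obtain ⟨h0, t, hht⟩ := List.exists_cons_of_ne_nil hne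
  -- abbreviations matching pvLoopA_char
  set M := pvMaxf 0 bs.dropLast with hMdef
  set k := bs.dropLast.idxOf M with hkdef
  set L2 := pvMaxf 0 (bs.drop (k + 1)) with hL2def
  have hvleM : v ≤ M := by
    have := pvMem_le_maxf 0 bs.dropLast v hv
    omega
  have hMpos : 0 < M := lt_of_lt_of_le hvpos hvleM
  have hMmem : M ∈ bs.dropLast := by
    rcases pvMaxf_eq_or_mem 0 bs.dropLast with h1 | h1
    · rw [hMdef] at hMpos ⊢; omega
    · exact h1
  -- A side: fold = pvLoopA, then the characterization
  have hfold := pvFoldA_eq_loopA bs bs 0 ((0 : Int), (none : Option Int)) (by simp)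
  norm_num at hfold
  have hchar := pvLoopA_char bs 0 none ⟨v, hv, hvpos⟩
  have hA : calculate_largest_joltage bs = (combine_joltages [M, L2]).getD 0 := by
    unfold calculate_largest_joltage
    rw [hfold, hchar]
  -- B side
  have hX : t.foldl max h0 = M := by
    have h1 : pvMaxf 0 bs.dropLast = max 0 (t.foldl max h0) := by
      rw [pvMaxf_eq_foldl_max, hht, List.foldl_cons]
      exact pvFoldlMax_init t 0 h0
    have h2 : 0 < t.foldl max h0 := by
      rw [← hMdef] at h1
      omega
    rw [← hMdef] at h1
    omega
  have hmax : PySem.List.max? (PySem.List.slice bs none (some (-1))) (fun y => y)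
      = some M := by
    rw [PySem.List.slice_to_neg_one, hht, PySem.List.max?_id_cons, hX]
  have hidx : (PySem.List.index? (PySem.List.slice bs none (some (-1))) M).getD 0 = k := by
    rw [PySem.List.slice_to_neg_one, pvIndex?_getD _ _ hMmem]
  have hB : calculate_largest_joltage_alt bs
      = (PySem.Int.ofStr? (PySem.Int.toStr M ++ PySem.Int.toStr L2)).getD 0 := by
    unfold calculate_largest_joltage_alt
    simp only [hmax, hidx]
    rw [show ((k : Int) + 1) = (((k + 1 : Nat)) : Int) by push_cast; ring,
        PySem.List.slice_from_natCast, PySem.List.max?_id_cons]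
    simp only [Option.getD_some]
    rw [show (bs.drop (k+1)).foldl max 0 = L2 by rw [hL2def, pvMaxf_eq_foldl_max]]
  rw [hA, hB]
  unfold combine_joltages
  rw [show ([M, L2].map PySem.Int.toStr) = [PySem.Int.toStr M, PySem.Int.toStr L2] from rfl,
      pvJoin_two]

-- ===== VERDICT (by name: the statement is the Claim_ definition above) =====
theorem calculate_largest_joltage_spec : Claim_equal_calculate_largest_joltage := by
  intro bs _ hpre
  exact calculate_largest_joltage_spec' bs hpre
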